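-- pv_equiv track=rewrite | github.com/vmred/codewars | katas/6kyu/Ticker/solution.py | ticker
-- ===== SOURCE A (Python) =====
-- def ticker(text, width, tick):
--     r = ' ' * width
--     pos = 1
--
--     for _ in range(1, tick + 1):
--         if r == ' ' * width and pos > len(text):
--             pos = 1
--
--         r = ' ' * (width - pos) + text[:pos]
--         if pos > width:
--             r = r[pos - width :]
--
--             if len(r) < width:
--                 r += ' ' * (width - len(r))
--
--         if len(r) < width:
--             r += ' ' * (width - len(r))
--
--         pos += 1
--
--     return r
-- ===== SOURCE B (Python) =====
-- def ticker(text, width, tick):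
--     # Closed form: the loop's pos is periodic with period P = max(len(text), width + t, 1),
--     # where t is len(text) without trailing spaces; compute the final offset by modular
--     # arithmetic and build the single final frame directly.
--     if tick < 1:
--         return ' ' * width
--     L = len(text)
--     t = L
--     while t > 0 and text[t - 1] == ' ':
--         t -= 1
--     P = max(L, width + t, 1)
--     pos = (tick - 1) % P + 1
--     start = max(0, pos - width)
--     seg = text[start:pos]
--     left = max(0, width - pos)
--     return ' ' * left + seg + ' ' * (width - left - len(seg))
-- ===== Notes on version B (the rewrite author's own statement) =====
-- stated objective: faster
-- what changed: Replaces the tick-step simulation loop with a closed form: the scroll position is periodic with period max(len(text), width + len(rstripped text), 1), so B computes the final position by one modular division and builds the single final frame directly.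
import Mathlib
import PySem

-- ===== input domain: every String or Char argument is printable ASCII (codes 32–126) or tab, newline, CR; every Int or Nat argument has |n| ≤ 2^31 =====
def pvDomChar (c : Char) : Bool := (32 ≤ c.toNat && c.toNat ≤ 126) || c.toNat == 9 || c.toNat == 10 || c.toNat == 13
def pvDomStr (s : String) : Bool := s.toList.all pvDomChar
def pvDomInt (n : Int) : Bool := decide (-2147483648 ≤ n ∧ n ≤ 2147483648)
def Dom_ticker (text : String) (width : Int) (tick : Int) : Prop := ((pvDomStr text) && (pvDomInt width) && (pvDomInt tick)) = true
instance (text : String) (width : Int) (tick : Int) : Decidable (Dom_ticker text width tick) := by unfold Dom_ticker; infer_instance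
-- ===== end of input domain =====

-- B is the same ticker computed in closed form (periodic position + one frame) instead of simulating tick steps.

-- ===== PORT A =====
-- the loop body: given the (possibly reset) pos, compute this step's frame r
def tickerBody (text : List Char) (width : Int) (pos : Int) : List Char :=
  let r1 := PySem.List.pyRepeat [' '] (width - pos) ++ PySem.List.slice text none (some pos)
  let r2 :=
    if pos > width then
      let r' := PySem.List.slice r1 (some (pos - width)) none
      if ((r'.length : Int) < width) then r' ++ PySem.List.pyRepeat [' '] (width - (r'.length : Int)) else r'
    else r1
  if ((r2.length : Int) < width) then r2 ++ PySem.List.pyRepeat [' '] (width - (r2.length : Int)) else r2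

def tickerStep (text : List Char) (width : Int) (st : List Char × Int) : List Char × Int :=
  let pos := if st.1 = PySem.List.pyRepeat [' '] width ∧ st.2 > (text.length : Int) then 1 else st.2
  (tickerBody text width pos, pos + 1)

def ticker (text : String) (width : Int) (tick : Int) : String :=
  let st := (PySem.List.pyRange 1 (tick + 1) 1).foldl
      (fun st _ => tickerStep text.toList width st)
      (PySem.List.pyRepeat [' '] width, 1)
  String.ofList st.1

-- ===== PORT B =====
-- the while loop of Source B: length of cs without its trailing spaces, computed from the reversed list
def trimLen : List Char → Nat
  | [] => 0
  | c :: rest => if c = ' ' then trimLen rest else rest.length + 1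

def frameB (text : List Char) (width : Int) (pos : Int) : List Char :=
  let start := max 0 (pos - width)
  let seg := PySem.List.slice text (some start) (some pos)
  let left := max 0 (width - pos)
  PySem.List.pyRepeat [' '] left ++ seg ++ PySem.List.pyRepeat [' '] (width - left - (seg.length : Int))

def ticker_alt (text : String) (width : Int) (tick : Int) : String :=
  if tick < 1 then String.ofList (PySem.List.pyRepeat [' '] width)
  else
    let cs := text.toList
    let t : Int := trimLen cs.reverse
    let P := max (max (cs.length : Int) (width + t)) 1
    let pos := PySem.Int.mod (tick - 1) P + 1
    String.ofList (frameB cs width pos)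

-- ===== PRECONDITION & SPEC =====
def Spec_ticker (text : String) (width : Int) (tick : Int) (out : String) : Prop := out = ticker_alt text width tick
instance (text : String) (width : Int) (tick : Int) (out : String) : Decidable (Spec_ticker text width tick out) := by unfold Spec_ticker; infer_instance

-- ===== CLAIM (what is proved, stated in full; the proofs are below) =====
def Claim_equal_ticker : Prop := ∀ (text : String) (width : Int) (tick : Int), Dom_ticker text width tick → Spec_ticker text width tick (ticker text width tick)

-- ===== LEMMAS AND PROOFS =====

-- trimLen is at most the length
lemma trimLen_le (m : List Char) : trimLen m ≤ m.length := by
  induction m with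
  | nil => simp [trimLen]
  | cons c rest ih =>
      simp only [trimLen, List.length_cons]
      split <;> omega

-- cs decomposes as a body of length (trimLen cs.reverse) whose last char is not ' ',
-- followed by spaces
lemma trim_decomp (m : List Char) :
    ∃ body : List Char, m.reverse = body ++ List.replicate (m.length - trimLen m) ' ' ∧
      body.length = trimLen m ∧ (∀ h : body ≠ [], body.getLast h ≠ ' ') := by
  induction m with
  | nil => exact ⟨[], by simp, by simp [trimLen], by simp⟩
  | cons c rest ih =>
      by_cases hc : c = ' '
      · obtain ⟨b, hb1, hb2, hb3⟩ := ih
        refine ⟨b, ?_, ?_, hb3⟩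
        · have hle := trimLen_le rest
          simp only [trimLen, if_pos hc, List.reverse_cons, List.length_cons]
          rw [hb1, hc, List.append_assoc, ← List.replicate_succ']
          congr 2
          omega
        · simp only [trimLen, if_pos hc]; exact hb2
      · refine ⟨rest.reverse ++ [c], ?_, ?_, ?_⟩
        · simp [trimLen, hc]
        · simp [trimLen, hc]
        · intro h
          rw [List.getLast_concat]
          exact hc

-- length of a frame is width.toNat
lemma frame_length (cs : List Char) (W p : Int) (hp : 1 ≤ p) :
    (frameB cs W p).length = W.toNat := by
  have h0 : (0:Int) ≤ max 0 (p - W) := le_max_left _ _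
  have h0p : (0:Int) ≤ p := by omega
  simp only [frameB, PySem.List.slice_toNat cs h0 h0p, PySem.List.pyRepeat_singleton,
    List.length_append, List.length_replicate, List.length_take, List.length_drop]
  omega

lemma blank_of (W : Int) (l : List Char) (h1 : l.length = W.toNat) (h2 : ∀ c ∈ l, c = ' ') :
    l = List.replicate W.toNat ' ' := List.eq_replicate_iff.mpr ⟨h1, h2⟩

-- when the visible window starts at or after the trimmed length, the frame is blank
lemma frame_blank (cs : List Char) (W p : Int) (hp : 1 ≤ p)
    (ht : (trimLen cs.reverse : Int) ≤ max 0 (p - W)) :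
    frameB cs W p = List.replicate W.toNat ' ' := by
  obtain ⟨b, hb1, hb2, hb3⟩ := trim_decomp cs.reverse
  rw [List.reverse_reverse, List.length_reverse] at hb1
  apply blank_of W _ (frame_length cs W p hp)
  intro ch hch
  have h0 : (0:Int) ≤ max 0 (p - W) := le_max_left _ _
  have h0p : (0:Int) ≤ p := by omega
  simp only [frameB, PySem.List.slice_toNat cs h0 h0p, PySem.List.pyRepeat_singleton,
    List.mem_append] at hch
  rcases hch with (hch | hch) | hch
  · exact List.eq_of_mem_replicate hch
  · -- ch in the slice: the dropped list lands entirely in the replicate part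
    have hmem : ch ∈ cs.drop (max 0 (p - W)).toNat := List.mem_of_mem_take hch
    rw [hb1, List.drop_append,
      List.drop_eq_nil_of_le (by omega : b.length ≤ (max 0 (p - W)).toNat)] at hmem
    simp only [List.nil_append, List.drop_replicate] at hmem
    exact List.eq_of_mem_replicate hmem
  · exact List.eq_of_mem_replicate hch

-- when the window starts before the trimmed length and the text is fully shown,
-- the frame contains the last non-space char
lemma frame_not_blank (cs : List Char) (W p : Int) (hp : 1 ≤ p)
    (ht : 0 < trimLen cs.reverse)
    (hstart : max 0 (p - W) < (trimLen cs.reverse : Int))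
    (hpL : (cs.length : Int) ≤ p) :
    frameB cs W p ≠ List.replicate W.toNat ' ' := by
  obtain ⟨b, hb1, hb2, hb3⟩ := trim_decomp cs.reverse
  rw [List.reverse_reverse, List.length_reverse] at hb1
  have hbne : b ≠ [] := by
    intro h; rw [h] at hb2; simp at hb2; omega
  have htL := trimLen_le cs.reverse
  rw [List.length_reverse] at htL
  set t := trimLen cs.reverse with hts
  set s := (max 0 (p - W)).toNat with hss
  have hst : s < t := by omega
  have h0 : (0:Int) ≤ max 0 (p - W) := le_max_left _ _
  have h0p : (0:Int) ≤ p := by omega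
  -- the char at index t-1 of cs is b.getLast, a non-space
  have hidx : t - 1 < cs.length := by omega
  obtain ⟨k, hk⟩ : ∃ k, cs.length - t = k := ⟨_, rfl⟩
  rw [hk] at hb1
  have hbx : t - 1 < b.length := by omega
  have hnsp : b[t-1]'hbx ≠ ' ' := by
    have h3 := hb3 hbne
    rw [List.getLast_eq_getElem] at h3
    convert h3 using 2
    omega
  have hcs : cs[t-1]'hidx = b[t-1]'hbx := by
    simp only [hb1]
    rw [List.getElem_append_left hbx]
  -- that char is in the frame's slice
  have hlt : t - 1 - s < ((cs.drop s).take (p.toNat - s)).length := by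
    simp only [List.length_take, List.length_drop]
    omega
  have hmem : b[t-1]'hbx ∈ (cs.drop s).take (p.toNat - s) := by
    rw [← hcs]
    have : ((cs.drop s).take (p.toNat - s))[t-1-s]'hlt = cs[t-1]'hidx := by
      rw [List.getElem_take, List.getElem_drop]
      congr 1
      omega
    exact this ▸ List.getElem_mem hlt
  intro hblank
  apply hnsp
  have hmem2 : b[t-1]'hbx ∈ frameB cs W p := by
    simp only [frameB, PySem.List.slice_toNat cs h0 h0p, PySem.List.pyRepeat_singleton,
      List.mem_append]
    left; right
    exact hmem
  rw [hblank] at hmem2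
  exact List.eq_of_mem_replicate hmem2

-- the loop body computes exactly the closed-form frame
lemma body_eq (cs : List Char) (W q : Int) (hq : 1 ≤ q) :
    tickerBody cs W q = frameB cs W q := by
  have h0q : (0:Int) ≤ q := by omega
  by_cases hqW : q > W
  · -- pos > width branch
    have hstart : max 0 (q - W) = q - W := by omega
    have hleft : max 0 (W - q) = 0 := by omega
    simp only [tickerBody, frameB, hstart, hleft, if_pos hqW,
      PySem.List.pyRepeat_singleton,
      PySem.List.slice_to cs h0q,
      PySem.List.slice_from _ (by omega : (0:Int) ≤ q - W),
      PySem.List.slice_toNat cs (by omega : (0:Int) ≤ q - W) h0q,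
      show (W - q).toNat = 0 by omega, List.replicate_zero, List.nil_append,
      show ((0:Int)).toNat = 0 by rfl, sub_zero,
      List.drop_take]
    set r' := (cs.drop (q - W).toNat).take (q.toNat - (q - W).toNat) with hr'
    by_cases hlen : ((r'.length : Int) < W)
    · rw [if_pos hlen]
      have hl2 : ((r' ++ List.replicate (W - (r'.length:Int)).toNat ' ').length : Int) = W := by
        simp only [List.length_append, List.length_replicate]
        push_cast
        omega
      rw [if_neg (by omega)]
    · rw [if_neg hlen, if_neg hlen,
        show (W - (r'.length:Int)).toNat = 0 by omega]
      simp
  · -- pos ≤ width branch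
    have hstart : max 0 (q - W) = 0 := by omega
    have hleft : max 0 (W - q) = W - q := by omega
    simp only [tickerBody, frameB, hstart, hleft, if_neg hqW,
      PySem.List.pyRepeat_singleton,
      PySem.List.slice_to cs h0q,
      PySem.List.slice_toNat cs (by omega : (0:Int) ≤ 0) h0q,
      show ((0:Int)).toNat = 0 by rfl, List.drop_zero, Nat.sub_zero]
    set sg := cs.take q.toNat with hsg
    have hsl : sg.length = min q.toNat cs.length := by simp [hsg]
    by_cases hlen : (((List.replicate (W - q).toNat ' ' ++ sg).length : Int) < W)
    · rw [if_pos hlen]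
      have hcnt : (W - ((List.replicate (W - q).toNat ' ' ++ sg).length : Int)).toNat
          = (W - (W - q) - (sg.length : Int)).toNat := by
        simp only [List.length_append, List.length_replicate]
        omega
      rw [hcnt, List.append_assoc]
    · rw [if_neg hlen]
      have hll : ((List.replicate (W - q).toNat ' ' ++ sg).length : Int)
          = (W - q) + sg.length := by
        simp only [List.length_append, List.length_replicate]
        push_cast
        omega
      rw [show (W - (W - q) - (sg.length:Int)).toNat = 0 by omega]
      simp

-- fold of a constant-body loop is iteration
lemma foldl_const {α : Type} (l : List Int) (f : α → α) (init : α) :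
    l.foldl (fun st _ => f st) init = f^[l.length] init := by
  induction l generalizing init with
  | nil => rfl
  | cons x xs ih => simp [List.foldl_cons, ih, Function.iterate_succ_apply]

-- the period and the closed-form position, as used by ticker_alt
def pvP (cs : List Char) (W : Int) : Int :=
  max (max (cs.length : Int) (W + (trimLen cs.reverse : Int))) 1

def pvPos (cs : List Char) (W : Int) (n : Nat) : Int := ((n : Int) - 1) % pvP cs W + 1

lemma pvP_pos (cs : List Char) (W : Int) : 0 < pvP cs W :=
  lt_of_lt_of_le zero_lt_one (le_max_right _ _)

lemma le_pvP_len (cs : List Char) (W : Int) : (cs.length : Int) ≤ pvP cs W :=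
  le_trans (le_max_left _ _) (le_max_left _ _)

lemma le_pvP_wt (cs : List Char) (W : Int) : W + (trimLen cs.reverse : Int) ≤ pvP cs W :=
  le_trans (le_max_right _ _) (le_max_left _ _)

lemma lt_of_lt_pvP (cs : List Char) (W p : Int) (h : p < pvP cs W) (h1 : 1 ≤ p)
    (h2 : (cs.length : Int) ≤ p) : p < W + (trimLen cs.reverse : Int) := by
  rcases lt_max_iff.mp h with h' | h'
  · rcases lt_max_iff.mp h' with h'' | h''
    · omega
    · exact h''
  · omega

lemma pvPos_bounds (cs : List Char) (W : Int) (n : Nat) :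
    1 ≤ pvPos cs W n ∧ pvPos cs W n ≤ pvP cs W := by
  unfold pvPos
  have h1 := Int.emod_nonneg ((n : Int) - 1) (pvP_pos cs W).ne'
  have h2 := Int.emod_lt_of_pos ((n : Int) - 1) (pvP_pos cs W)
  omega

lemma pvPos_one (cs : List Char) (W : Int) : pvPos cs W 1 = 1 := by
  unfold pvPos
  norm_num

lemma pvPos_succ (cs : List Char) (W : Int) (n : Nat) :
    pvPos cs W (n + 1) = if pvPos cs W n = pvP cs W then 1 else pvPos cs W n + 1 := by
  have h1 := Int.emod_nonneg ((n : Int) - 1) (pvP_pos cs W).ne'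
  have h2 := Int.emod_lt_of_pos ((n : Int) - 1) (pvP_pos cs W)
  have key : ((n + 1 : Nat) : Int) - 1 = (((n : Int) - 1) + 1) := by push_cast; ring
  unfold pvPos
  rw [key, ← Int.emod_add_emod]
  by_cases hP : ((n : Int) - 1) % pvP cs W + 1 = pvP cs W
  · rw [if_pos hP, hP, Int.emod_self]
    norm_num
  · rw [if_neg hP, Int.emod_eq_of_lt (by omega) (by omega)]

-- step lemmas
lemma step_reset (cs : List Char) (W : Int) (st : List Char × Int)
    (h1 : st.1 = List.replicate W.toNat ' ') (h2 : st.2 > (cs.length : Int)) :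
    tickerStep cs W st = (frameB cs W 1, 2) := by
  simp only [tickerStep, PySem.List.pyRepeat_singleton]
  rw [if_pos ⟨h1, h2⟩, body_eq cs W 1 (by norm_num)]
  norm_num

lemma step_noreset (cs : List Char) (W : Int) (st : List Char × Int)
    (h : ¬(st.1 = List.replicate W.toNat ' ' ∧ st.2 > (cs.length : Int)))
    (hq : 1 ≤ st.2) :
    tickerStep cs W st = (frameB cs W st.2, st.2 + 1) := by
  simp only [tickerStep, PySem.List.pyRepeat_singleton]
  rw [if_neg h, body_eq cs W st.2 hq]

-- the first step always lands on frame 1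
lemma iter_one (cs : List Char) (W : Int) :
    tickerStep cs W (List.replicate W.toNat ' ', 1) = (frameB cs W 1, 2) := by
  by_cases hc : ((List.replicate W.toNat ' ', (1:Int)).1 = List.replicate W.toNat ' '
      ∧ ((List.replicate W.toNat ' ', (1:Int)).2 > (cs.length : Int)))
  · exact step_reset cs W _ hc.1 hc.2
  · exact step_noreset cs W _ hc (by norm_num)

-- all-space text: every iterate holds a blank frame
lemma iter_blank (cs : List Char) (W : Int) (ht : trimLen cs.reverse = 0) (m : Nat) :
    ∃ p : Int, 1 ≤ p ∧
      (tickerStep cs W)^[m + 1] (List.replicate W.toNat ' ', 1) = (frameB cs W p, p + 1) := by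
  induction m with
  | zero => exact ⟨1, by norm_num, by simpa using iter_one cs W⟩
  | succ m ih =>
      obtain ⟨p, hp1, hiter⟩ := ih
      have hblank : frameB cs W p = List.replicate W.toNat ' ' :=
        frame_blank cs W p hp1 (by rw [ht]; exact le_trans (by norm_num) (le_max_left _ _))
      rw [Function.iterate_succ_apply', hiter]
      by_cases hL : p + 1 > (cs.length : Int)
      · exact ⟨1, by norm_num, by rw [step_reset cs W _ hblank hL]; norm_num⟩
      · refine ⟨p + 1, by omega, ?_⟩
        rw [step_noreset cs W _ (by intro hc; exact hL hc.2) (by omega : 1 ≤ (frameB cs W p, p+1).2)]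

-- text with a non-space: the iterates follow the closed-form position
lemma iter_pos (cs : List Char) (W : Int) (ht : 1 ≤ trimLen cs.reverse) (m : Nat) :
    (tickerStep cs W)^[m + 1] (List.replicate W.toNat ' ', 1)
      = (frameB cs W (pvPos cs W (m + 1)), pvPos cs W (m + 1) + 1) := by
  have htL := trimLen_le cs.reverse
  rw [List.length_reverse] at htL
  induction m with
  | zero => rw [pvPos_one]; simpa using iter_one cs W
  | succ m ih =>
      obtain ⟨hb1, hb2⟩ := pvPos_bounds cs W (m + 1)
      set p := pvPos cs W (m + 1) with hps
      rw [Function.iterate_succ_apply', ih]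
      by_cases hP : p = pvP cs W
      · have hblank : frameB cs W p = List.replicate W.toNat ' ' := by
          apply frame_blank cs W p hb1
          have := le_pvP_wt cs W
          omega
        have hL : p + 1 > (cs.length : Int) := by
          have := le_pvP_len cs W
          omega
        rw [step_reset cs W _ hblank hL, pvPos_succ cs W (m+1), if_pos hP]
        norm_num
      · have hnr : ¬((frameB cs W p, p + 1).1 = List.replicate W.toNat ' '
            ∧ (frameB cs W p, p + 1).2 > (cs.length : Int)) := by
          rintro ⟨hbl, hgt⟩
          have hpL : (cs.length : Int) ≤ p := by omega
          have hPub : p < pvP cs W := by omega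
          have hlt : max 0 (p - W) < (trimLen cs.reverse : Int) := by
            have := lt_of_lt_pvP cs W p hPub hb1 hpL
            omega
          exact frame_not_blank cs W p hb1 ht hlt hpL hbl
        rw [step_noreset cs W _ hnr (by omega : 1 ≤ (frameB cs W p, p+1).2),
          pvPos_succ cs W (m+1), if_neg hP]

-- ===== VERDICT (by name: the statement is the Claim_ definition above) =====
theorem ticker_spec : Claim_equal_ticker := by
  unfold Claim_equal_ticker
  intro text width tick _
  unfold Spec_ticker ticker ticker_alt
  by_cases htick : tick < 1
  · rw [if_pos htick, PySem.List.pyRange_one_eq_nil (by omega : tick + 1 ≤ 1)]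
    rfl
  · rw [if_neg htick]
    rw [foldl_const, PySem.List.length_pyRange_one, PySem.List.pyRepeat_singleton,
      show tick + 1 - 1 = tick from by ring]
    obtain ⟨m, hm⟩ : ∃ m, tick.toNat = m + 1 := ⟨tick.toNat - 1, by omega⟩
    have hcast : ((tick.toNat : Int)) = tick := Int.toNat_of_nonneg (by omega)
    have hposAlt : PySem.Int.mod (tick - 1) (pvP text.toList width) + 1
        = pvPos text.toList width tick.toNat := by
      rw [PySem.Int.mod_eq_emod_of_pos (pvP_pos text.toList width)]
      unfold pvPos
      rw [hcast]
    rw [hm] at hposAlt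
    show String.ofList ((tickerStep text.toList width)^[tick.toNat]
        (List.replicate width.toNat ' ', 1)).1
      = String.ofList (frameB text.toList width
          (PySem.Int.mod (tick - 1) (pvP text.toList width) + 1))
    rw [hm, hposAlt]
    by_cases ht : trimLen text.toList.reverse = 0
    · obtain ⟨p, hp1, hiter⟩ := iter_blank text.toList width ht m
      rw [hiter]
      have h1 := frame_blank text.toList width p hp1
        (by rw [ht]; exact le_trans (by norm_num) (le_max_left _ _))
      have h2 := frame_blank text.toList width (pvPos text.toList width (m+1))
        (pvPos_bounds text.toList width (m+1)).1
        (by rw [ht]; exact le_trans (by norm_num) (le_max_left _ _))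
      rw [h1, h2]
    · rw [iter_pos text.toList width (by omega) m]
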